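-- pv_equiv track=rewrite | github.com/gopikrishvs/TurboLabs-QA-Solutions | answer_3.py | find_profit
-- ===== SOURCE A (Python) =====
-- def find_profit(price_chart, d):
--     profit = 0
--     for i in range(d):
--         if any(v > 5 for v in iter(price_chart.values())):
--             highest = max(price_chart, key=price_chart.get)
--             profit += price_chart[highest]
--             price_chart.pop(highest)
--         else:
--             for j in price_chart:
--                 if price_chart[j] <= 5:
--                     profit += 5
--                     price_chart.pop(j)
--                 break
--
--         for i in price_chart:
--             price_chart[i] -= 2
--     return profit
-- ===== SOURCE B (Python) =====
-- def find_profit(price_chart, d):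
--     # Sort values descending once; round t's take is the t-th largest minus the
--     # global decrement 2*t, floored at 5 once everything has dropped to <= 5.
--     vals = sorted(price_chart.values(), reverse=True)
--     rounds = max(0, min(d, len(vals)))
--     return sum(max(v - 2 * t, 5) for t, v in enumerate(vals[:rounds]))
-- ===== Notes on version B (the rewrite author's own statement) =====
-- stated objective: faster
-- what changed: B replaces A's d-round simulation (each round: linear scan for the max, pop it, decrement every remaining value) by one descending sort of the values plus the closed per-round formula max(v_t - 2*t, 5) over the first min(d, n) rounds; Pre_ only excludes association lists with duplicate keys, which do not encode any Python dict.
import Mathlib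
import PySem

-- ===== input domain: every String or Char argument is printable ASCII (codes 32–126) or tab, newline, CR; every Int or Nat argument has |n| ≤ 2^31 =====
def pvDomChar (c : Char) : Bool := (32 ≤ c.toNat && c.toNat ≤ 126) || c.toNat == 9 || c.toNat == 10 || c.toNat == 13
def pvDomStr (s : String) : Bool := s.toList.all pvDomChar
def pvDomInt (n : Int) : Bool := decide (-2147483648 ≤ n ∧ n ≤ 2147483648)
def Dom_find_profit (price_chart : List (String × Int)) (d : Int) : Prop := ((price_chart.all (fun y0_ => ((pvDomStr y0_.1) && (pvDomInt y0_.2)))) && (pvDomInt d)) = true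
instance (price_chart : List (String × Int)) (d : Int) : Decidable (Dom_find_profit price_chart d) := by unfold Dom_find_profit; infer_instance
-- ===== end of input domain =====

-- B replaces A's d-round simulation (pop the max, decrement everything) by one
-- descending sort of the values plus a closed per-round formula; objective: faster.
-- A mutates its dict argument in place (pops entries, decrements values); B does not —
-- the equivalence proved here is about the RETURN value only.

-- ===== PORT A =====
-- max(price_chart, key=price_chart.get): scan the dict in insertion order keeping the
-- first pair with the strictly greatest value; for a dict (distinct keys, guaranteed by
-- Pre_) price_chart[highest] is exactly this pair's value.
def pvMaxPair : (String × Int) → List (String × Int) → (String × Int)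
  | best, [] => best
  | best, p :: rest => pvMaxPair (if p.2 > best.2 then p else best) rest

-- price_chart.pop(key): remove the first (for a dict: the only) pair with this key
def pvPopKey (k : String) : List (String × Int) → List (String × Int)
  | [] => []
  | p :: rest => if p.1 = k then rest else p :: pvPopKey k rest

-- body of 'for i in range(d)': n remaining rounds, running profit, current dict
def pvLoopA : Nat → Int → List (String × Int) → Int
  | 0, profit, _ => profit
  | n + 1, profit, pc =>
    let st :=
      if pc.any (fun p => p.2 > 5) then
        match pc with
        | [] => (profit, ([] : List (String × Int)))   -- unreachable: any on [] is false
        | q :: rest =>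
          let highest := pvMaxPair q rest
          (profit + highest.2, pvPopKey highest.1 pc)
      else
        match pc with
        | [] => (profit, pc)                            -- 'for j in price_chart' runs zero times
        | q :: rest =>                                  -- first key, then break
          if q.2 ≤ 5 then (profit + 5, pvPopKey q.1 (q :: rest)) else (profit, q :: rest)
    -- for i in price_chart: price_chart[i] -= 2
    pvLoopA n st.1 (st.2.map (fun p => (p.1, p.2 - 2)))

def find_profit (price_chart : List (String × Int)) (d : Int) : Int :=
  pvLoopA d.toNat 0 price_chart

-- ===== PORT B =====
def find_profit_alt (price_chart : List (String × Int)) (d : Int) : Int :=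
  let vals := PySem.List.sorted (price_chart.map Prod.snd) (fun v => v) true
  let rounds : Int := max 0 (min d (vals.length : Int))
  (PySem.List.enumerate (PySem.List.slice vals none (some rounds))).foldl
    (fun acc tv => acc + max (tv.2 - 2 * tv.1) 5) 0

-- ===== PRECONDITION & SPEC =====
-- Pre_ excludes association lists with duplicate keys: they do not encode any Python
-- dict (A's argument is a dict, so every real input has pairwise-distinct keys).
def Pre_find_profit (price_chart : List (String × Int)) (d : Int) : Prop :=
  (price_chart.map Prod.fst).Nodup
instance (price_chart : List (String × Int)) (d : Int) : Decidable (Pre_find_profit price_chart d) := by unfold Pre_find_profit; infer_instance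

def pvWitness_find_profit : (List (String × Int)) × Int := ([("a", 9), ("b", 3)], 3)

def Spec_find_profit (price_chart : List (String × Int)) (d : Int) (out : Int) : Prop := out = find_profit_alt price_chart d
instance (price_chart : List (String × Int)) (d : Int) (out : Int) : Decidable (Spec_find_profit price_chart d out) := by unfold Spec_find_profit; infer_instance

-- ===== CLAIM (what is proved, stated in full; the proofs are below) =====
def Claim_equal_find_profit : Prop := ∀ (price_chart : List (String × Int)) (d : Int), Dom_find_profit price_chart d → Pre_find_profit price_chart d → Spec_find_profit price_chart d (find_profit price_chart d)

-- ===== LEMMAS AND PROOFS =====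

-- Abstract round recursion on the already-sorted value list:
-- while the head (already globally decremented) exceeds 5 take it, afterwards 5 per round.
def pvG : List Int → Nat → Int
  | _, 0 => 0
  | [], _ + 1 => 0
  | v :: rest, n + 1 =>
    if v > 5 then v + pvG (rest.map (· - 2)) n else 5 * min (n + 1) (rest.length + 1)

lemma pvG_nil (n : Nat) : pvG [] n = 0 := by cases n <;> rfl

lemma pvG_of_head_le (v : Int) (rest : List Int) (n : Nat) (h : v ≤ 5) :
    pvG (v :: rest) (n + 1) = 5 * min (n + 1) (rest.length + 1) := by
  have hv : ¬ v > 5 := by omega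
  simp [pvG, hv]

lemma pvMaxPair_mem (q : String × Int) (rest : List (String × Int)) :
    pvMaxPair q rest ∈ q :: rest := by
  induction rest generalizing q with
  | nil => simp [pvMaxPair]
  | cons p rest ih =>
    simp only [pvMaxPair]
    have h := ih (if p.2 > q.2 then p else q)
    rcases List.mem_cons.mp h with h | h
    · rw [h]; split <;> simp
    · simp [h]

lemma pvMaxPair_ge (q : String × Int) (rest : List (String × Int)) :
    ∀ p ∈ q :: rest, p.2 ≤ (pvMaxPair q rest).2 := by
  induction rest generalizing q with
  | nil => simp [pvMaxPair]
  | cons p rest ih =>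
    intro r hr
    simp only [pvMaxPair]
    have hhead : (if p.2 > q.2 then p else q).2
        ≤ (pvMaxPair (if p.2 > q.2 then p else q) rest).2 :=
      ih _ _ (List.mem_cons_self ..)
    rcases List.mem_cons.mp hr with rfl | hr'
    · have hq : r.2 ≤ (if p.2 > r.2 then p else r).2 := by split <;> omega
      omega
    rcases List.mem_cons.mp hr' with rfl | hr''
    · have hp : r.2 ≤ (if r.2 > q.2 then r else q).2 := by split <;> omega
      omega
    · exact ih _ r (List.mem_cons_of_mem _ hr'')

lemma pvPopKey_sublist (k : String) (pc : List (String × Int)) :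
    (pvPopKey k pc).Sublist pc := by
  induction pc with
  | nil => simp [pvPopKey]
  | cons p rest ih =>
    simp only [pvPopKey]
    split
    · exact (List.sublist_cons_self p rest)
    · exact ih.cons₂ p

lemma pvPopKey_perm (h : String × Int) (pc : List (String × Int))
    (hnd : (pc.map Prod.fst).Nodup) (hm : h ∈ pc) :
    (pvPopKey h.1 pc).Perm (pc.erase h) := by
  induction pc with
  | nil => simp at hm
  | cons p rest ih =>
    simp only [List.map_cons, List.nodup_cons] at hnd
    rcases List.mem_cons.mp hm with rfl | hmr
    · simp [pvPopKey, List.erase_cons_head]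
    · have hne : p ≠ h := by
        rintro rfl; exact hnd.1 (List.mem_map.mpr ⟨_, hmr, rfl⟩)
      have hnek : ¬ p.1 = h.1 := by
        intro hk; exact hnd.1 (hk ▸ List.mem_map.mpr ⟨h, hmr, rfl⟩)
      rw [List.erase_cons_tail (by simpa using hne)]
      simp only [pvPopKey, if_neg hnek]
      exact (ih hnd.2 hmr).cons p

-- uniqueness of the descending sort: any ≥-pairwise rearrangement IS sorted(…, reverse=True)
lemma sortedDesc_eq (xs ys : List Int) (hp : ys.Perm xs)
    (hs : ys.Pairwise (fun a b => b ≤ a)) :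
    PySem.List.sorted xs (fun v => v) true = ys := by
  have h1 : (PySem.List.sorted xs (fun v => v) true).Perm ys :=
    (PySem.List.sorted_perm xs (fun v => v) true).trans hp.symm
  have h2 : (PySem.List.sorted xs (fun v => v) true).Pairwise (fun a b => b ≤ a) :=
    PySem.List.sorted_pairwise_rev xs (fun v => v)
  exact List.Perm.eq_of_pairwise' h2 hs h1

-- all values ≤ 5: every remaining round pops one entry for +5
lemma pvLoopA_allLe (n : Nat) :
    ∀ (profit : Int) (pc : List (String × Int)), (∀ p ∈ pc, p.2 ≤ 5) →
    pvLoopA n profit pc = profit + 5 * min n pc.length := by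
  induction n with
  | zero => intro profit pc _; simp [pvLoopA]
  | succ n ih =>
    intro profit pc hle
    have hany : pc.any (fun p => p.2 > 5) = false := by
      simp only [List.any_eq_false]
      intro p hp; simpa using (by have := hle p hp; omega : ¬ p.2 > 5)
    cases pc with
    | nil => simp [pvLoopA, hany, ih]
    | cons q rest =>
      have hq5 : q.2 ≤ 5 := hle q (by simp)
      have hrle : ∀ p ∈ rest.map (fun p => (p.1, p.2 - 2)), p.2 ≤ 5 := by
        intro p hp
        rcases List.mem_map.mp hp with ⟨r, hr, rfl⟩
        have := hle r (List.mem_cons_of_mem _ hr)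
        simpa using by omega
      simp only [pvLoopA, hany, Bool.false_eq_true, if_false, if_pos hq5,
        pvPopKey, if_true]
      rw [ih (profit + 5) (rest.map (fun p => (p.1, p.2 - 2))) hrle]
      simp only [List.length_map, List.length_cons]
      omega

lemma pvG_allLe (l : List Int) (n : Nat) (hle : ∀ x ∈ l, x ≤ 5) :
    pvG l n = 5 * min n l.length := by
  cases n with
  | zero => simp [pvG]
  | succ n =>
    cases l with
    | nil => simp [pvG]
    | cons v rest =>
      rw [pvG_of_head_le v rest n (hle v (by simp))]
      simp

-- main invariant: A's loop equals pvG on the descending sort of the values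
lemma pvLoopA_eq_pvG (n : Nat) :
    ∀ (profit : Int) (pc : List (String × Int)), (pc.map Prod.fst).Nodup →
    pvLoopA n profit pc =
      profit + pvG (PySem.List.sorted (pc.map Prod.snd) (fun v => v) true) n := by
  induction n with
  | zero => intro profit pc _; simp [pvLoopA, pvG]
  | succ n ih =>
    intro profit pc hnd
    by_cases hany : pc.any (fun p => p.2 > 5) = true
    · -- some value > 5: take the max
      rcases List.any_eq_true.mp hany with ⟨w, hw, hw5⟩
      cases pc with
      | nil => simp at hw
      | cons q rest =>
        set h := pvMaxPair q rest with hh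
        have hmem : h ∈ q :: rest := pvMaxPair_mem q rest
        have hge : ∀ p ∈ q :: rest, p.2 ≤ h.2 := pvMaxPair_ge q rest
        -- the sorted value list is nonempty; name it M :: T
        have hperm : (PySem.List.sorted ((q :: rest).map Prod.snd) (fun v => v) true).Perm
            ((q :: rest).map Prod.snd) := PySem.List.sorted_perm _ _ _
        cases hs : PySem.List.sorted ((q :: rest).map Prod.snd) (fun v => v) true with
        | nil => exact absurd (hs ▸ hperm).symm (by simp)
        | cons M T =>
          have hpair : (M :: T).Pairwise (fun a b : Int => b ≤ a) := by
            have := PySem.List.sorted_pairwise_rev ((q :: rest).map Prod.snd) (fun v => v)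
            rw [hs] at this; simpa using this
          have hMmax : ∀ y ∈ (q :: rest).map Prod.snd, y ≤ M :=
            PySem.List.key_head_sorted_rev_ge _ _ hs
          have hMh : M = h.2 := by
            have h1 : h.2 ≤ M := hMmax h.2 (List.mem_map.mpr ⟨h, hmem, rfl⟩)
            have h2 : M ≤ h.2 := by
              have : M ∈ (q :: rest).map Prod.snd := (hs ▸ hperm).mem_iff.mp (by simp)
              rcases List.mem_map.mp this with ⟨r, hr, rfl⟩
              exact hge r hr
            omega
          have hw5' : w.2 > 5 := by simpa using hw5
          have hM5 : M > 5 := by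
            have := hMmax w.2 (List.mem_map.mpr ⟨w, hw, rfl⟩); omega
          -- values of the popped list ≈ T
          have hpop : ((pvPopKey h.1 (q :: rest)).map Prod.snd).Perm T := by
            have p1 : (pvPopKey h.1 (q :: rest)).Perm ((q :: rest).erase h) :=
              pvPopKey_perm h (q :: rest) hnd hmem
            have p3 : ((q :: rest).map Prod.snd).Perm (h.2 :: ((q :: rest).erase h).map Prod.snd) := by
              have := (List.perm_cons_erase hmem).map Prod.snd
              simpa using this
            have p4 : (h.2 :: ((q :: rest).erase h).map Prod.snd).Perm (M :: T) :=
              (p3.symm.trans (hs ▸ hperm).symm)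
            have p5 : (((q :: rest).erase h).map Prod.snd).Perm T := by
              rw [hMh] at p4
              exact (List.perm_cons h.2).mp p4
            exact (p1.map Prod.snd).trans p5
          have hndpop : ((pvPopKey h.1 (q :: rest)).map Prod.fst).Nodup :=
            hnd.sublist ((pvPopKey_sublist h.1 (q :: rest)).map Prod.fst)
          simp only [pvLoopA, hany, if_true]
          rw [ih (profit + h.2)
            ((pvPopKey h.1 (q :: rest)).map (fun p => (p.1, p.2 - 2)))
            (by simpa [List.map_map, Function.comp] using hndpop)]
          have hvals : ((pvPopKey h.1 (q :: rest)).map (fun p => (p.1, p.2 - 2))).map Prod.snd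
              = ((pvPopKey h.1 (q :: rest)).map Prod.snd).map (· - 2) := by
            simp [List.map_map, Function.comp]
          rw [hvals]
          have hsorted2 : PySem.List.sorted
              (((pvPopKey h.1 (q :: rest)).map Prod.snd).map (· - 2)) (fun v => v) true
              = T.map (· - 2) := by
            apply sortedDesc_eq
            · exact (hpop.map (· - 2)).symm
            · have hT : T.Pairwise (fun a b : Int => b ≤ a) := hpair.sublist (by simp)
              exact List.pairwise_map.mpr (hT.imp (by intro a b hab; omega))
          rw [hsorted2]
          have : pvG (M :: T) (n + 1) = M + pvG (T.map (· - 2)) n := by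
            simp [pvG, hM5]
          rw [this, hMh]; ring
    · -- all values ≤ 5
      have hle : ∀ p ∈ pc, p.2 ≤ 5 := by
        intro p hp
        by_contra hgt
        rw [not_le] at hgt
        exact hany (List.any_eq_true.mpr ⟨p, hp, by simp; omega⟩)
      rw [pvLoopA_allLe (n + 1) profit pc hle]
      congr 1
      have hperm : (PySem.List.sorted (pc.map Prod.snd) (fun v => v) true).Perm
          (pc.map Prod.snd) := PySem.List.sorted_perm _ _ _
      have hall : ∀ x ∈ PySem.List.sorted (pc.map Prod.snd) (fun v => v) true, x ≤ 5 := by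
        intro x hx
        rcases List.mem_map.mp (hperm.mem_iff.mp hx) with ⟨r, hr, rfl⟩
        exact hle r hr
      rw [pvG_allLe _ _ hall, hperm.length_eq, List.length_map]

-- B's fold over the enumerated prefix equals pvG (on a descending list)
lemma pvFold_eq_pvG (s : List Int) (hs : s.Pairwise (fun a b => b ≤ a)) :
    ∀ (n : Nat) (acc : Int) (c : Int), 0 ≤ c →
    (PySem.List.enumerate (s.take (min n s.length)) c).foldl
        (fun acc tv => acc + max (tv.2 - 2 * tv.1) 5) acc
      = acc + pvG (s.map (fun v => v - 2 * c)) n := by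
  induction s with
  | nil => intro n acc c _; simp [pvG_nil]
  | cons v rest ih =>
    intro n acc c hc
    cases n with
    | zero => simp [pvG]
    | succ n =>
      have htake : (v :: rest).take (min (n + 1) (v :: rest).length)
          = v :: rest.take (min n rest.length) := by
        simp only [List.length_cons, Nat.succ_min_succ, List.take_succ_cons]
      rw [htake, PySem.List.enumerate_cons, List.foldl_cons]
      have hrest : rest.Pairwise (fun a b : Int => b ≤ a) := hs.sublist (by simp)
      rw [ih hrest n (acc + max (v - 2 * c) 5) (c + 1) (by omega)]
      by_cases h5 : v - 2 * c > 5
      · have : pvG ((v :: rest).map (fun x => x - 2 * c)) (n + 1)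
            = (v - 2 * c) + pvG ((rest.map (fun x => x - 2 * c)).map (· - 2)) n := by
          simp [pvG, h5]
        rw [this]
        have hmm : (rest.map (fun x => x - 2 * c)).map (· - 2)
            = rest.map (fun x => x - 2 * (c + 1)) := by
          rw [List.map_map]
          refine List.map_congr_left fun a _ => ?_
          simp only [Function.comp_apply]
          ring
        rw [hmm]
        have : max (v - 2 * c) 5 = v - 2 * c := by omega
        rw [this]; ring
      · -- head already ≤ 5, everything from here on is 5 per round
        have hvle : v - 2 * c ≤ 5 := by omega
        have hle1 : ∀ x ∈ rest.map (fun x => x - 2 * (c + 1)), x ≤ 5 := by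
          intro x hx
          rcases List.mem_map.mp hx with ⟨y, hy, rfl⟩
          have : y ≤ v := (List.pairwise_cons.mp hs).1 y hy
          omega
        rw [pvG_allLe _ n hle1]
        have : pvG ((v :: rest).map (fun x => x - 2 * c)) (n + 1)
            = 5 * min (n + 1) ((rest.map (fun x => x - 2 * c)).length + 1) := by
          rw [List.map_cons]
          exact pvG_of_head_le _ _ n hvle
        rw [this]
        have : max (v - 2 * c) 5 = 5 := by omega
        rw [this]
        simp only [List.length_map]
        have hm : (5 : Int) * min (n + 1) (rest.length + 1)
            = 5 + 5 * min n rest.length := by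
          have : min (n + 1) (rest.length + 1) = min n rest.length + 1 := by omega
          rw [this]; push_cast; ring
        rw [hm]; ring

lemma find_profit_alt_eq_pvG (pc : List (String × Int)) (d : Int) :
    find_profit_alt pc d
      = pvG (PySem.List.sorted (pc.map Prod.snd) (fun v => v) true) d.toNat := by
  have hdef : find_profit_alt pc d =
      (PySem.List.enumerate (PySem.List.slice
          (PySem.List.sorted (pc.map Prod.snd) (fun v => v) true) none
          (some (max 0 (min d ((PySem.List.sorted (pc.map Prod.snd) (fun v => v) true).length : Int)))))).foldl
        (fun acc tv => acc + max (tv.2 - 2 * tv.1) 5) 0 := rfl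
  rw [hdef]
  set s := PySem.List.sorted (pc.map Prod.snd) (fun v => v) true with hsdef
  have hs : s.Pairwise (fun a b : Int => b ≤ a) := by
    have := PySem.List.sorted_pairwise_rev (pc.map Prod.snd) (fun v => v)
    simpa [hsdef] using this
  have hrnn : (0 : Int) ≤ max 0 (min d (s.length : Int)) := le_max_left _ _
  rw [PySem.List.slice_to _ hrnn]
  have hton : (max 0 (min d (s.length : Int))).toNat = min d.toNat s.length := by omega
  rw [hton]
  have := pvFold_eq_pvG s hs d.toNat 0 0 le_rfl
  simpa using this

-- ===== VERDICT (by name: the statement is the Claim_ definition above) =====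
theorem find_profit_spec : Claim_equal_find_profit := by
  intro pc d _ hpre
  unfold Spec_find_profit find_profit
  rw [find_profit_alt_eq_pvG, pvLoopA_eq_pvG d.toNat 0 pc hpre]
  ring
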